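-- pv_equiv track=rewrite | github.com/dzhao14/HackerRank_code | competitions/Week_of_Code_35/matrix_land.py | calcBest
-- ===== SOURCE A (Python) =====
-- def calcBest(table, row, n, m):
--     best = [0 for i in range(m)]
--     max_left = [0 for i in range(m)]
--     max_right = [0 for i in range(m)]
--     for i in range(m-1, -1, -1):
--         if i == m-1:
--             max_left[i] = table[row][i]
--         else:
--             max_left[i] = max(table[row][i], max_left[i+1] + table[row][i])
--     for i in range(m):
--         if i == 0:
--             max_right[i] = table[row][i]
--         else:
--             max_right[i] = max(table[row][i], max_right[i-1] + table[row][i])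
--     for i in range(m):
--         best[i] = max(max_right[i], max_left[i],
--                    max_right[i] + max_left[i] - table[row][i])
--     return best
-- ===== SOURCE B (Python) =====
-- def calcBest(table, row, n, m):
--     # Prefix-sum formulation: best[i] = max subarray sum containing column i
--     # = (max prefix sum P[j], j>i) - (min prefix sum P[k], k<=i).
--     if m <= 0:
--         return []
--     r = table[row][:m]
--     P = [0]
--     for x in r:
--         P.append(P[-1] + x)
--     pref_min = P[:]
--     for i in range(1, len(P)):
--         pref_min[i] = min(pref_min[i - 1], P[i])
--     suf_max = P[:]
--     for i in range(len(P) - 2, -1, -1):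
--         suf_max[i] = max(suf_max[i], suf_max[i + 1])
--     return [suf_max[i + 1] - pref_min[i] for i in range(m)]
-- ===== Notes on version B (the rewrite author's own statement) =====
-- stated objective: alternative
-- what changed: Replaces A's two dynamic-programming arrays (max segment ending/starting at each column) and three-way max by a prefix-sum array with a running prefix-minimum and suffix-maximum, so best[i] = sufMax[i+1] - prefMin[i].
import Mathlib
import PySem

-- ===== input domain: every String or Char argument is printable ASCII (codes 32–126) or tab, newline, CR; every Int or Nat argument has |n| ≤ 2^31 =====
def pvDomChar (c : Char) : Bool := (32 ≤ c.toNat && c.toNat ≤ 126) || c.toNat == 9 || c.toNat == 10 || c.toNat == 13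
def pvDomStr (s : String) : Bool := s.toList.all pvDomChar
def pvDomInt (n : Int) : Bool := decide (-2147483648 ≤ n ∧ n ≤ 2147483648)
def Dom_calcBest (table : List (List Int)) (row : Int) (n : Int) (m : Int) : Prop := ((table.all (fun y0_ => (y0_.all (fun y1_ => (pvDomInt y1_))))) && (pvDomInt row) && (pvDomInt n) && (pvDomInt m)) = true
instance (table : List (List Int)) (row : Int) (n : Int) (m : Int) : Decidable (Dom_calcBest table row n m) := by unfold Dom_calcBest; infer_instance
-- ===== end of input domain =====

-- B replaces A's two DP arrays by prefix sums with a prefix-min and suffix-max pass (alternative decomposition, same value).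

-- ===== PORT A =====
-- backward loop: max_left[i] = table[row][i] at i = m-1, else max(table[row][i], max_left[i+1] + table[row][i])
def maxLeftA : List Int → List Int
  | [] => []
  | [x] => [x]
  | x :: y :: t => max x ((maxLeftA (y :: t)).headD 0 + x) :: maxLeftA (y :: t)

-- forward loop carrying the previous entry: max_right[i] = max(table[row][i], max_right[i-1] + table[row][i])
def maxRightAux (prev : Int) : List Int → List Int
  | [] => []
  | x :: t => max x (prev + x) :: maxRightAux (max x (prev + x)) t

def maxRightA : List Int → List Int
  | [] => []
  | x :: t => x :: maxRightAux x t

def calcBest (table : List (List Int)) (row : Int) (n : Int) (m : Int) : List Int :=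
  -- the values table[row][i] for i in range(m) (Pre_ guarantees every access is in range)
  let r := (PySem.List.pyGetD table row []).take m.toNat
  List.zipWith (fun (p : Int × Int) x => max (max p.1 p.2) (p.1 + p.2 - x))
    ((maxRightA r).zip (maxLeftA r)) r

-- ===== PORT B =====
-- backward pass: suf_max[i] = max(suf_max[i], suf_max[i+1])
def sufMaxB : List Int → List Int
  | [] => []
  | [x] => [x]
  | x :: y :: t => max x ((sufMaxB (y :: t)).headD 0) :: sufMaxB (y :: t)

def calcBest_alt (table : List (List Int)) (row : Int) (n : Int) (m : Int) : List Int :=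
  if m ≤ 0 then []
  else
    let r := PySem.List.slice (PySem.List.pyGetD table row []) none (some m)  -- table[row][:m]
    let P := List.scanl (· + ·) 0 r                                           -- prefix sums, P[0] = 0
    let prefMin := List.scanl min (P.headD 0) P.tail                             -- pref_min[0] = P[0]; pref_min[i] = min(pref_min[i-1], P[i])
    let sufMax := sufMaxB P
    List.zipWith (· - ·) sufMax.tail prefMin

-- ===== PRECONDITION & SPEC =====
-- Pre_ excludes exactly the inputs where Python A raises: for m > 0 it indexes table[row][i]
-- for every i < m, so the row index must be in range and the row must have at least m entries.
def Pre_calcBest (table : List (List Int)) (row : Int) (n : Int) (m : Int) : Prop :=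
  0 < m → (PySem.Raise.InRange table.length row ∧ m ≤ ((PySem.List.pyGetD table row []).length : Int))
instance (table : List (List Int)) (row : Int) (n : Int) (m : Int) : Decidable (Pre_calcBest table row n m) := by unfold Pre_calcBest; infer_instance

def pvWitness_calcBest : List (List Int) × Int × Int × Int := ([[1, -2, 3]], 0, 1, 3)

def Spec_calcBest (table : List (List Int)) (row : Int) (n : Int) (m : Int) (out : List Int) : Prop := out = calcBest_alt table row n m
instance (table : List (List Int)) (row : Int) (n : Int) (m : Int) (out : List Int) : Decidable (Spec_calcBest table row n m out) := by unfold Spec_calcBest; infer_instance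

-- ===== CLAIM (what is proved, stated in full; the proofs are below) =====
def Claim_equal_calcBest : Prop := ∀ (table : List (List Int)) (row : Int) (n : Int) (m : Int), Dom_calcBest table row n m → Pre_calcBest table row n m → Spec_calcBest table row n m (calcBest table row n m)

-- ===== LEMMAS AND PROOFS =====

theorem headD_eq_getElem (l : List Int) (h : 0 < l.length) : l.headD 0 = l[0] := by
  cases l with
  | nil => simp at h
  | cons a u => simp

theorem length_maxLeftA (l : List Int) : (maxLeftA l).length = l.length := by
  induction l with
  | nil => rfl
  | cons x t ih =>
    cases t with
    | nil => simp [maxLeftA]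
    | cons y v => simp only [maxLeftA, List.length_cons, ih]

theorem length_maxRightAux (l : List Int) : ∀ p, (maxRightAux p l).length = l.length := by
  induction l with
  | nil => intro p; rfl
  | cons x t ih => intro p; simp [maxRightAux, ih]

theorem length_maxRightA (l : List Int) : (maxRightA l).length = l.length := by
  cases l with
  | nil => rfl
  | cons x t => simp [maxRightA, length_maxRightAux]

theorem length_sufMaxB (l : List Int) : (sufMaxB l).length = l.length := by
  induction l with
  | nil => rfl
  | cons x t ih =>
    cases t with
    | nil => simp [sufMaxB]
    | cons y v => simp only [sufMaxB, List.length_cons, ih]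

theorem getElem_scanl_zero (f : Int → Int → Int) (b : Int) (l : List Int)
    (h : 0 < (List.scanl f b l).length) : (List.scanl f b l)[0] = b := by
  cases l <;> simp [List.scanl_nil, List.scanl_cons]

theorem getElem_scanl_succ (f : Int → Int → Int) (l : List Int) : ∀ (b : Int) (i : Nat) (h : i < l.length),
    (List.scanl f b l)[i + 1]'(by rw [List.length_scanl]; omega)
      = f ((List.scanl f b l)[i]'(by rw [List.length_scanl]; omega)) (l[i]) := by
  induction l with
  | nil => intro b i h; simp at h
  | cons a t ih =>
    intro b i h
    cases i with
    | zero => simp [List.scanl_cons]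
    | succ j =>
      have hj : j < t.length := by simpa using h
      simp only [List.scanl_cons, List.getElem_cons_succ]
      exact ih (f b a) j hj

theorem maxRightAux_succ (t : List Int) : ∀ (p : Int) (i : Nat) (h : i + 1 < t.length),
    (maxRightAux p t)[i + 1]'(by rw [length_maxRightAux]; omega)
      = max (t[i + 1]) ((maxRightAux p t)[i]'(by rw [length_maxRightAux]; omega) + t[i + 1]) := by
  induction t with
  | nil => intro p i h; simp at h
  | cons x u ih =>
    intro p i h
    cases i with
    | zero =>
      cases u with
      | nil => simp at h
      | cons y v => simp [maxRightAux]
    | succ j =>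
      have hj : j + 1 < u.length := by simpa using h
      simp only [maxRightAux, List.getElem_cons_succ]
      exact ih _ j hj

theorem maxRightA_zero (l : List Int) (h : 0 < l.length) :
    (maxRightA l)[0]'(by rw [length_maxRightA]; omega) = l[0] := by
  cases l with
  | nil => simp at h
  | cons x t => simp [maxRightA]

theorem maxRightA_succ (l : List Int) (i : Nat) (h : i + 1 < l.length) :
    (maxRightA l)[i + 1]'(by rw [length_maxRightA]; omega)
      = max (l[i + 1]) ((maxRightA l)[i]'(by rw [length_maxRightA]; omega) + l[i + 1]) := by
  cases l with
  | nil => simp at h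
  | cons x t =>
    cases i with
    | zero =>
      cases t with
      | nil => simp at h
      | cons y v => simp [maxRightA, maxRightAux]
    | succ j =>
      have hj : j + 1 < t.length := by simpa using h
      simp only [maxRightA, List.getElem_cons_succ]
      exact maxRightAux_succ t x j hj

theorem sufMaxB_last (l : List Int) : ∀ (hl : 0 < l.length),
    (sufMaxB l)[l.length - 1]'(by rw [length_sufMaxB]; omega) = l[l.length - 1]'(by omega) := by
  induction l with
  | nil => intro hl; simp at hl
  | cons x t ih =>
    intro hl
    cases t with
    | nil => simp [sufMaxB]
    | cons y v =>
      have h1 : (x :: y :: v).length - 1 = ((y :: v).length - 1) + 1 := by simp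
      simp only [sufMaxB, h1, List.getElem_cons_succ]
      exact ih (by simp)

theorem sufMaxB_succ (l : List Int) : ∀ (i : Nat) (h : i + 1 < l.length),
    (sufMaxB l)[i]'(by rw [length_sufMaxB]; omega)
      = max (l[i]'(by omega)) ((sufMaxB l)[i + 1]'(by rw [length_sufMaxB]; omega)) := by
  induction l with
  | nil => intro i h; simp at h
  | cons x t ih =>
    intro i h
    cases t with
    | nil => simp at h
    | cons y v =>
      cases i with
      | zero =>
        simp only [sufMaxB, List.getElem_cons_succ, List.getElem_cons_zero]
        congr 1
        exact headD_eq_getElem _ (by rw [length_sufMaxB]; simp)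
      | succ j =>
        have hj : j + 1 < (y :: v).length := by simpa using h
        simp only [sufMaxB, List.getElem_cons_succ]
        exact ih j hj

theorem maxLeftA_last (l : List Int) : ∀ (hl : 0 < l.length),
    (maxLeftA l)[l.length - 1]'(by rw [length_maxLeftA]; omega) = l[l.length - 1]'(by omega) := by
  induction l with
  | nil => intro hl; simp at hl
  | cons x t ih =>
    intro hl
    cases t with
    | nil => simp [maxLeftA]
    | cons y v =>
      have h1 : (x :: y :: v).length - 1 = ((y :: v).length - 1) + 1 := by simp
      simp only [maxLeftA, h1, List.getElem_cons_succ]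
      exact ih (by simp)

theorem maxLeftA_succ (l : List Int) : ∀ (i : Nat) (h : i + 1 < l.length),
    (maxLeftA l)[i]'(by rw [length_maxLeftA]; omega)
      = max (l[i]'(by omega)) ((maxLeftA l)[i + 1]'(by rw [length_maxLeftA]; omega) + l[i]'(by omega)) := by
  induction l with
  | nil => intro i h; simp at h
  | cons x t ih =>
    intro i h
    cases t with
    | nil => simp at h
    | cons y v =>
      cases i with
      | zero =>
        simp only [maxLeftA, List.getElem_cons_succ, List.getElem_cons_zero]
        congr 2
        exact headD_eq_getElem _ (by rw [length_maxLeftA]; simp)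
      | succ j =>
        have hj : j + 1 < (y :: v).length := by simpa using h
        simp only [maxLeftA, List.getElem_cons_succ]
        exact ih j hj

theorem pm_le_P (r : List Int) (i : Nat) (h : i < r.length + 1) :
    (List.scanl min 0 (List.scanl (· + ·) (0:Int) r).tail)[i]'(by simp [List.length_scanl]; omega)
      ≤ (List.scanl (· + ·) (0:Int) r)[i]'(by rw [List.length_scanl]; omega) := by
  cases i with
  | zero =>
    rw [getElem_scanl_zero, getElem_scanl_zero]
  | succ j =>
    have hj : j < (List.scanl (· + ·) (0:Int) r).tail.length := by
      simp [List.length_scanl]; omega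
    rw [getElem_scanl_succ min _ 0 j hj, List.getElem_tail]
    exact min_le_right _ _

theorem S_ge_P (r : List Int) (i : Nat) (h : i < r.length + 1) :
    (List.scanl (· + ·) (0:Int) r)[i]'(by rw [List.length_scanl]; omega)
      ≤ (sufMaxB (List.scanl (· + ·) (0:Int) r))[i]'(by rw [length_sufMaxB, List.length_scanl]; omega) := by
  by_cases h2 : i + 1 < r.length + 1
  · rw [sufMaxB_succ _ i (by rw [List.length_scanl]; omega)]
    exact le_max_left _ _
  · have hi : i = r.length := by omega
    subst hi
    have hS := sufMaxB_last (List.scanl (· + ·) (0:Int) r) (by rw [List.length_scanl]; omega)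
    simp only [List.length_scanl, Nat.add_sub_cancel] at hS
    exact le_of_eq hS.symm

theorem mr_eq (r : List Int) : ∀ (i : Nat) (h : i < r.length),
    (maxRightA r)[i]'(by rw [length_maxRightA]; omega)
      = (List.scanl (· + ·) (0:Int) r)[i + 1]'(by rw [List.length_scanl]; omega)
        - (List.scanl min 0 (List.scanl (· + ·) (0:Int) r).tail)[i]'(by simp [List.length_scanl]; omega) := by
  intro i
  induction i with
  | zero =>
    intro h
    rw [maxRightA_zero r (by omega), getElem_scanl_succ (· + ·) r 0 0 h, getElem_scanl_zero,
        getElem_scanl_zero]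
    omega
  | succ j ih =>
    intro h
    have hj : j < r.length := by omega
    rw [maxRightA_succ r j h, ih hj, getElem_scanl_succ (· + ·) r 0 (j + 1) h,
        getElem_scanl_succ min _ 0 j (by simp [List.length_scanl]; omega), List.getElem_tail,
        getElem_scanl_succ (· + ·) r 0 j hj]
    omega

theorem ml_eq (r : List Int) : ∀ (k i : Nat) (hk : r.length - 1 - i = k) (h : i < r.length),
    (maxLeftA r)[i]'(by rw [length_maxLeftA]; omega)
      = (sufMaxB (List.scanl (· + ·) (0:Int) r))[i + 1]'(by rw [length_sufMaxB, List.length_scanl]; omega)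
        - (List.scanl (· + ·) (0:Int) r)[i]'(by rw [List.length_scanl]; omega) := by
  intro k
  induction k with
  | zero =>
    intro i hk h
    have hi : i = r.length - 1 := by omega
    subst hi
    rw [maxLeftA_last r (by omega)]
    have hS := sufMaxB_last (List.scanl (· + ·) (0:Int) r) (by rw [List.length_scanl]; omega)
    simp only [List.length_scanl, Nat.add_sub_cancel] at hS
    have e : r.length - 1 + 1 = r.length := by omega
    have h7 := getElem_scanl_succ (· + ·) r 0 (r.length - 1) (by omega)
    simp only [e] at h7 ⊢
    rw [hS]
    omega
  | succ k ih =>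
    intro i hk h
    have h1 : i + 1 < r.length := by omega
    rw [maxLeftA_succ r i (by omega), ih (i + 1) (by omega) h1,
        sufMaxB_succ (List.scanl (· + ·) (0:Int) r) (i + 1) (by rw [List.length_scanl]; omega),
        getElem_scanl_succ (· + ·) r 0 i (by omega)]
    omega

theorem best_eq (r : List Int) :
    List.zipWith (fun (p : Int × Int) x => max (max p.1 p.2) (p.1 + p.2 - x))
        ((maxRightA r).zip (maxLeftA r)) r
      = List.zipWith (· - ·) (sufMaxB (List.scanl (· + ·) (0:Int) r)).tail
          (List.scanl min ((List.scanl (· + ·) (0:Int) r).headD 0)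
            (List.scanl (· + ·) (0:Int) r).tail) := by
  have hhead : (List.scanl (· + ·) (0:Int) r).headD 0 = 0 := by
    cases r <;> simp [List.scanl_nil, List.scanl_cons]
  rw [hhead]
  apply List.ext_getElem
  · simp [List.length_zipWith, List.length_zip, length_maxRightA, length_maxLeftA,
      length_sufMaxB, List.length_scanl]
  · intro i h1 h2
    have hi : i < r.length := by
      simp [List.length_zipWith, List.length_zip, length_maxRightA, length_maxLeftA] at h1
      omega
    rw [List.getElem_zipWith, List.getElem_zipWith, List.getElem_zip, List.getElem_tail]
    simp only
    rw [mr_eq r i hi, ml_eq r (r.length - 1 - i) i rfl hi]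
    have h5 := pm_le_P r i (by omega)
    have h6 := S_ge_P r (i + 1) (by omega)
    have h7 := getElem_scanl_succ (· + ·) r 0 i hi
    omega

-- ===== VERDICT (by name: the statement is the Claim_ definition above) =====
theorem calcBest_spec : Claim_equal_calcBest := by
  intro table row n m _ _
  unfold Spec_calcBest calcBest calcBest_alt
  by_cases hm : m ≤ 0
  · have h0 : m.toNat = 0 := by omega
    rw [if_pos hm]
    simp [h0]
  · rw [if_neg hm]
    have hr : PySem.List.slice (PySem.List.pyGetD table row []) none (some m)
        = (PySem.List.pyGetD table row []).take m.toNat :=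
      PySem.List.slice_to _ (by omega)
    simp only [hr]
    exact best_eq _
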